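-- pv_equiv track=rewrite | github.com/youmean0427/Algorithm | 백준/Bronze/9506. 약수들의 합/약수들의 합.py | divisor
-- ===== SOURCE A (Python) =====
-- def divisor(x):
--     div = []
--
--     for i in range(1, x):
--         if x % i == 0:
--             div.append(i)
--
--     if sum(div) == x:
--         answer = str(x) + ' = '
--         cnt = 0
--         while cnt < len(div):
--             answer += str(div[cnt])
--             if cnt != len(div)-1:
--                 answer = answer + " + "
--             cnt += 1
--         return answer
--
--     else:
--         answer = str(x) + " is NOT perfect."
--         return answer
-- ===== SOURCE B (Python) =====
-- def divisor(x):
--     # Collect divisor pairs up to sqrt(x): O(sqrt(x)) instead of O(x).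
--     small, large = [], []
--     i = 1
--     while i * i <= x:
--         if x % i == 0:
--             if i != x:
--                 small.append(i)
--             q = x // i
--             if q != i and q != x:
--                 large.append(q)
--         i += 1
--     div = small + large[::-1]
--     if sum(div) == x:
--         return str(x) + ' = ' + ' + '.join(str(d) for d in div)
--     return str(x) + " is NOT perfect."
-- ===== Notes on version B (the rewrite author's own statement) =====
-- stated objective: faster
-- what changed: B collects divisor pairs (i, x//i) only up to sqrt(x) and assembles the answer with ' + '.join instead of A's full range(1, x) trial loop and manual index/separator while loop.
import Mathlib
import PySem

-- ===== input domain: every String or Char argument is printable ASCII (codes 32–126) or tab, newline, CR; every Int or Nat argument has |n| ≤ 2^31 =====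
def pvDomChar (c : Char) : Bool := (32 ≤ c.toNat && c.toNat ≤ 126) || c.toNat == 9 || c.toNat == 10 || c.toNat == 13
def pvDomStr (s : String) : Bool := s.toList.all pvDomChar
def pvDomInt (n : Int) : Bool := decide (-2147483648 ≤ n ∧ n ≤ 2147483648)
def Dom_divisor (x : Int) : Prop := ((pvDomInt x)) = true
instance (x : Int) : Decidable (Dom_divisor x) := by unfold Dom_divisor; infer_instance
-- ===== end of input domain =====

-- B enumerates divisor pairs only up to the square root of x instead of A's trial loop over
-- all of range(1, x), and joins the list with str.join instead of A's manual index/separator loop.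

-- used by bLoop's termination proof: while i*i ≤ x, i stays ≤ x
lemma pv_le_of_sq_le (x i : Int) (h : i * i ≤ x) : i ≤ x := by nlinarith [sq_nonneg i]

-- ===== PORT A =====
-- A's answer-building while loop (cnt over indices, " + " after every non-last element)
def aLoop (div : List Int) (cnt : Nat) (ans : List Char) : List Char :=
  if cnt < div.length then
    let ans1 := ans ++ PySem.Int.toChars (div.getD cnt 0)
    let ans2 := if cnt ≠ div.length - 1 then ans1 ++ (" + ".toList) else ans1
    aLoop div (cnt+1) ans2
  else ans
termination_by div.length - cnt

def divisor (x : Int) : String :=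
  let div := (PySem.List.pyRange 1 x 1).foldl
    (fun acc i => if PySem.Int.mod x i == 0 then acc ++ [i] else acc) []
  if div.sum == x then
    String.ofList (aLoop div 0 (PySem.Int.toChars x ++ " = ".toList))
  else
    String.ofList (PySem.Int.toChars x ++ " is NOT perfect.".toList)

-- ===== PORT B =====
-- Source B's while loop over i with i*i <= x: small collects i, large collects the cofactor x//i
def bLoop (x i : Int) (small large : List Int) : List Int × List Int :=
  if i * i ≤ x then
    if PySem.Int.mod x i == 0 then
      bLoop x (i+1)
        (if i ≠ x then small ++ [i] else small)
        (if PySem.Int.floordiv x i ≠ i ∧ PySem.Int.floordiv x i ≠ x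
          then large ++ [PySem.Int.floordiv x i] else large)
    else bLoop x (i+1) small large
  else (small, large)
termination_by (x + 1 - i).toNat
decreasing_by
· have := pv_le_of_sq_le x i (by assumption); omega
· have := pv_le_of_sq_le x i (by assumption); omega

def divisor_alt (x : Int) : String :=
  let p := bLoop x 1 [] []
  let div := p.1 ++ p.2.reverse
  if div.sum == x then
    String.ofList (PySem.Int.toChars x ++ " = ".toList ++
      PySem.Chars.join (" + ".toList) (div.map PySem.Int.toChars))
  else
    String.ofList (PySem.Int.toChars x ++ " is NOT perfect.".toList)

-- ===== PRECONDITION & SPEC =====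
def Spec_divisor (x : Int) (out : String) : Prop := out = divisor_alt x
instance (x : Int) (out : String) : Decidable (Spec_divisor x out) := by unfold Spec_divisor; infer_instance

-- ===== CLAIM (what is proved, stated in full; the proofs are below) =====
def Claim_equal_divisor : Prop := ∀ (x : Int), Dom_divisor x → Spec_divisor x (divisor x)

-- ===== LEMMAS AND PROOFS =====

-- A's divisor list: ascending proper divisors of x
def divList (x : Int) : List Int :=
  (PySem.List.pyRange 1 x 1).filter (fun i => PySem.Int.mod x i == 0)

-- the last i for which B's loop guard i*i ≤ x can hold (0 when x ≤ 0)
def pvK (x : Int) : Int := (Nat.sqrt x.toNat : Int)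

-- what bLoop appends to small / large from counter i on
def smallsF (x i : Int) : List Int :=
  (PySem.List.pyRange i (pvK x + 1) 1).filter
    (fun j => decide (PySem.Int.mod x j = 0) && decide (j ≠ x))
def largesF (x i : Int) : List Int :=
  ((PySem.List.pyRange i (pvK x + 1) 1).filter
    (fun j => decide (PySem.Int.mod x j = 0) &&
      decide (PySem.Int.floordiv x j ≠ j ∧ PySem.Int.floordiv x j ≠ x))).map
    (fun j => PySem.Int.floordiv x j)

lemma sq_le_iff_le_pvK (x i : Int) (hi : 1 ≤ i) : i * i ≤ x ↔ i ≤ pvK x := by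
  unfold pvK
  constructor
  · intro h
    have hx : 0 ≤ x := le_trans (by nlinarith) h
    have h1 : i.toNat * i.toNat ≤ x.toNat := by
      have hit : (i.toNat : Int) = i := Int.toNat_of_nonneg (by omega)
      zify; rw [hit]; omega
    have := Nat.le_sqrt'.mpr (by nlinarith [h1])
    omega
  · intro h
    have h2 : Nat.sqrt x.toNat * Nat.sqrt x.toNat ≤ x.toNat := by
      have := Nat.sqrt_le' x.toNat; nlinarith
    have hx0 : 0 ≤ x := by
      by_contra hc
      have hz : x.toNat = 0 := by omega
      rw [hz] at h; simp [Nat.sqrt] at h; omega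
    calc i * i ≤ (Nat.sqrt x.toNat : Int) * (Nat.sqrt x.toNat : Int) := by nlinarith
      _ ≤ (x.toNat : Int) := by exact_mod_cast h2
      _ = x := Int.toNat_of_nonneg hx0

-- unwinding B's loop: it appends exactly smallsF / largesF
lemma bLoop_eq (x i : Int) (hi : 1 ≤ i) (s l : List Int) :
    bLoop x i s l = (s ++ smallsF x i, l ++ largesF x i) := by
  rw [bLoop]
  by_cases hguard : i * i ≤ x
  · have hik : i ≤ pvK x := (sq_le_iff_le_pvK x i hi).1 hguard
    have hrange : PySem.List.pyRange i (pvK x + 1) 1 = i :: PySem.List.pyRange (i+1) (pvK x + 1) 1 :=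
      PySem.List.pyRange_one_cons (by omega)
    simp only [if_pos hguard]
    by_cases hmod : PySem.Int.mod x i = 0
    · simp only [hmod, beq_self_eq_true, if_pos]
      rw [bLoop_eq x (i+1) (by omega)]
      unfold smallsF largesF
      rw [hrange]
      simp only [List.filter_cons, hmod, decide_true, Bool.true_and]
      split_ifs with h1 h2 <;> simp_all
    · have hbf : (PySem.Int.mod x i == 0) = false := by simpa using hmod
      simp only [hbf, Bool.false_eq_true, if_false]
      rw [bLoop_eq x (i+1) (by omega)]
      unfold smallsF largesF
      rw [hrange]
      simp [hmod]
  · have hik : pvK x < i := by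
      by_contra hc
      exact hguard ((sq_le_iff_le_pvK x i hi).2 (by omega))
    have hrange : PySem.List.pyRange i (pvK x + 1) 1 = [] :=
      PySem.List.pyRange_one_eq_nil (by omega)
    simp [if_neg hguard, smallsF, largesF, hrange]
termination_by (x + 1 - i).toNat
decreasing_by
· have := pv_le_of_sq_le x i (by assumption); omega
· have := pv_le_of_sq_le x i (by assumption); omega

-- cofactor identity: for 1 ≤ j dividing x, x//j is exact division
lemma cofactor_eq (x j : Int) (hj : 1 ≤ j) (hd : j ∣ x) :
    j * PySem.Int.floordiv x j = x := by
  rw [PySem.Int.floordiv_eq_ediv_of_pos (by omega), mul_comm]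
  exact Int.ediv_mul_cancel hd

lemma mem_divList (x m : Int) : m ∈ divList x ↔ 1 ≤ m ∧ m < x ∧ m ∣ x := by
  unfold divList
  simp only [List.mem_filter, PySem.List.mem_pyRange_one, beq_iff_eq,
    PySem.Int.mod_eq_zero_iff_dvd]
  tauto

lemma mem_smallsF (x m : Int) : m ∈ smallsF x 1 ↔ 1 ≤ m ∧ m ≤ pvK x ∧ m ∣ x ∧ m ≠ x := by
  unfold smallsF
  simp only [List.mem_filter, PySem.List.mem_pyRange_one, Bool.and_eq_true, decide_eq_true_eq,
    PySem.Int.mod_eq_zero_iff_dvd]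
  constructor
  · rintro ⟨⟨h1, h2⟩, h3, h4⟩; exact ⟨h1, by omega, h3, h4⟩
  · rintro ⟨h1, h2, h3, h4⟩; exact ⟨⟨h1, by omega⟩, h3, h4⟩

lemma mem_largesF (x m : Int) : m ∈ largesF x 1 ↔
    ∃ j, 1 ≤ j ∧ j ≤ pvK x ∧ j ∣ x ∧ PySem.Int.floordiv x j ≠ j ∧ PySem.Int.floordiv x j ≠ x
      ∧ m = PySem.Int.floordiv x j := by
  unfold largesF
  simp only [List.mem_map, List.mem_filter, PySem.List.mem_pyRange_one, Bool.and_eq_true,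
    decide_eq_true_eq, PySem.Int.mod_eq_zero_iff_dvd]
  constructor
  · rintro ⟨j, ⟨⟨h1, h2⟩, h3, h4, h5⟩, rfl⟩
    exact ⟨j, h1, by omega, h3, h4, h5, rfl⟩
  · rintro ⟨j, h1, h2, h3, h4, h5, rfl⟩
    exact ⟨j, ⟨⟨h1, by omega⟩, h3, h4, h5⟩, rfl⟩

-- small and large halves together hold exactly the proper divisors
lemma mem_union (x m : Int) (hx : 1 ≤ x) :
    (m ∈ smallsF x 1 ∨ m ∈ largesF x 1) ↔ m ∈ divList x := by
  rw [mem_divList, mem_smallsF, mem_largesF]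
  constructor
  · rintro (⟨h1, h2, h3, h4⟩ | ⟨j, hj1, hj2, hj3, hj4, hj5, rfl⟩)
    · have := Int.le_of_dvd (by omega) h3
      exact ⟨h1, by omega, h3⟩
    · have hco := cofactor_eq x j hj1 hj3
      set m := PySem.Int.floordiv x j with hm
      have hm1 : 1 ≤ m := by nlinarith
      have hdvd : m ∣ x := ⟨j, by rw [← hco]; ring⟩
      have := Int.le_of_dvd (by omega) hdvd
      exact ⟨hm1, by omega, hdvd⟩
  · rintro ⟨h1, h2, h3⟩
    by_cases hs : m ≤ pvK x
    · exact Or.inl ⟨h1, hs, h3, by omega⟩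
    · right
      obtain ⟨j, hj⟩ := h3
      have hj1 : 1 ≤ j := by nlinarith
      have hjd : j ∣ x := ⟨m, by rw [hj]; ring⟩
      have hfd : PySem.Int.floordiv x j = m := by
        have hco := cofactor_eq x j hj1 hjd
        nlinarith [hco]
      have hmm : x < m * m := by
        by_contra hc
        exact hs ((sq_le_iff_le_pvK x m h1).1 (by omega))
      have hjlt : j < m := by nlinarith
      have hjK : j ≤ pvK x := (sq_le_iff_le_pvK x j hj1).1 (by nlinarith)
      exact ⟨j, hj1, hjK, hjd, by omega, by omega, hfd.symm⟩

lemma pairwise_divList (x : Int) : (divList x).Pairwise (· < ·) :=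
  List.Pairwise.filter _ (PySem.List.pairwise_lt_pyRange_one 1 x)

lemma pairwise_smallsF (x : Int) : (smallsF x 1).Pairwise (· < ·) :=
  List.Pairwise.filter _ (PySem.List.pairwise_lt_pyRange_one 1 (pvK x + 1))

lemma pairwise_largesF (x : Int) (hx : 1 ≤ x) : (largesF x 1).Pairwise (fun a b => b < a) := by
  unfold largesF
  rw [List.pairwise_map]
  have hpw : (List.filter
      (fun j => decide (PySem.Int.mod x j = 0) &&
        decide (PySem.Int.floordiv x j ≠ j ∧ PySem.Int.floordiv x j ≠ x))
      (PySem.List.pyRange 1 (pvK x + 1) 1)).Pairwise (· < ·) :=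
    List.Pairwise.filter _ (PySem.List.pairwise_lt_pyRange_one 1 (pvK x + 1))
  refine List.Pairwise.imp_of_mem ?_ hpw
  intro a b ha hb hab
  have ha' := List.mem_filter.1 ha
  have hb' := List.mem_filter.1 hb
  simp only [Bool.and_eq_true, decide_eq_true_eq, PySem.Int.mod_eq_zero_iff_dvd,
    PySem.List.mem_pyRange_one] at ha' hb'
  have ha1 : 1 ≤ a := ha'.1.1
  have hb1 : 1 ≤ b := hb'.1.1
  have hca := cofactor_eq x a ha1 ha'.2.1
  have hcb := cofactor_eq x b hb1 hb'.2.1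
  have h1 : 1 ≤ PySem.Int.floordiv x b := by nlinarith
  nlinarith

lemma mem_largesF_gt (x m : Int) (hx : 1 ≤ x) (hm : m ∈ largesF x 1) : pvK x < m := by
  rw [mem_largesF] at hm
  obtain ⟨j, hj1, hj2, hj3, hj4, hj5, rfl⟩ := hm
  have hco := cofactor_eq x j hj1 hj3
  set m := PySem.Int.floordiv x j with hmdef
  have hm1 : 1 ≤ m := by nlinarith
  have hjj : j * j ≤ x := (sq_le_iff_le_pvK x j hj1).2 hj2
  have hlej : j ≤ m := by nlinarith
  have hjm : j < m := by omega
  have : x < m * m := by nlinarith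
  by_contra hc
  have := (sq_le_iff_le_pvK x m hm1).2 (by omega)
  omega

-- B builds exactly A's ascending divisor list
lemma blist_eq_divList (x : Int) : smallsF x 1 ++ (largesF x 1).reverse = divList x := by
  by_cases hx : 1 ≤ x
  · have hpwL : (smallsF x 1 ++ (largesF x 1).reverse).Pairwise (· < ·) := by
      rw [List.pairwise_append]
      refine ⟨pairwise_smallsF x, List.pairwise_reverse.2 (pairwise_largesF x hx), ?_⟩
      intro a ha b hb
      have ha' := (mem_smallsF x a).1 ha
      have hb' := mem_largesF_gt x b hx (List.mem_reverse.1 hb)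
      omega
    have hpwD := pairwise_divList x
    have hmem : ∀ m, m ∈ smallsF x 1 ++ (largesF x 1).reverse ↔ m ∈ divList x := by
      intro m
      rw [List.mem_append, List.mem_reverse]
      exact mem_union x m hx
    have hperm : (smallsF x 1 ++ (largesF x 1).reverse).Perm (divList x) :=
      (List.perm_ext_iff_of_nodup (hpwL.imp ne_of_lt) (hpwD.imp ne_of_lt)).2 hmem
    exact PySem.List.eq_of_perm_of_pairwise_le_of_injective (fun y => y) (fun a b h => h)
      hperm (hpwL.imp le_of_lt) (hpwD.imp le_of_lt)
  · have hK : pvK x = 0 := by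
      unfold pvK
      have hz : x.toNat = 0 := by omega
      simp [hz]
    have h1 : PySem.List.pyRange 1 (pvK x + 1) 1 = [] :=
      PySem.List.pyRange_one_eq_nil (by omega)
    have h2 : PySem.List.pyRange 1 x 1 = [] :=
      PySem.List.pyRange_one_eq_nil (by omega)
    simp [smallsF, largesF, divList, h1, h2]

-- A's separator loop is the " + "-join of the remaining elements
lemma aLoop_eq_join (div : List Int) (cnt : Nat) (ans : List Char) :
    aLoop div cnt ans =
      ans ++ PySem.Chars.join (" + ".toList) ((div.drop cnt).map PySem.Int.toChars) := by
  rw [aLoop]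
  by_cases h : cnt < div.length
  · simp only [if_pos h]
    rw [aLoop_eq_join div (cnt+1)]
    have hd : div.drop cnt = div[cnt] :: div.drop (cnt+1) := List.drop_eq_getElem_cons h
    have hgd : div.getD cnt 0 = div[cnt] := List.getD_eq_getElem div 0 h
    by_cases hlast : cnt = div.length - 1
    · have hnil : div.drop (cnt+1) = [] := List.drop_eq_nil_of_le (by omega)
      rw [if_neg (by omega : ¬ cnt ≠ div.length - 1), hd, hnil]
      simp only [List.map_cons, List.map_nil, PySem.Chars.join_singleton,
        PySem.Chars.join_nil, List.append_nil, hgd]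
    · have hlt : cnt + 1 < div.length := by omega
      have hd2 : div.drop (cnt+1) = div[cnt+1] :: div.drop (cnt+2) := List.drop_eq_getElem_cons hlt
      rw [if_pos hlast, hd, hd2]
      simp only [List.map_cons, PySem.Chars.join_cons_cons, hgd, List.append_assoc]
  · simp only [if_neg h]
    have hnil : div.drop cnt = [] := List.drop_eq_nil_of_le (by omega)
    rw [hnil]
    simp [PySem.Chars.join_nil]
termination_by div.length - cnt

-- A's accumulation loop is a filter
lemma adiv_eq_divList (x : Int) :
    (PySem.List.pyRange 1 x 1).foldl
      (fun acc i => if PySem.Int.mod x i == 0 then acc ++ [i] else acc) [] = divList x := by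
  unfold divList
  have := PySem.List.foldl_append_if (fun i => PySem.Int.mod x i == 0) (fun i : Int => i)
    (PySem.List.pyRange 1 x 1) ([] : List Int)
  simpa using this

-- ===== VERDICT (by name: the statement is the Claim_ definition above) =====
theorem divisor_spec : Claim_equal_divisor := by
  intro x _
  unfold Spec_divisor divisor divisor_alt
  rw [bLoop_eq x 1 (le_refl 1) [] []]
  simp only [List.nil_append]
  rw [blist_eq_divList, adiv_eq_divList, aLoop_eq_join]
  simp
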